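-- pv_equiv track=rewrite | github.com/k-harada/AtCoder | ADT/20250508/G.py | solve
-- ===== SOURCE A (Python) =====
-- def solve(n, s):
--     count_row = [0] * n
--     count_col = [0] * n
--     for i in range(n):
--         for j in range(n):
--             if s[i][j] == "o":
--                 count_row[i] += 1
--                 count_col[j] += 1
--     res = 0
--     for i in range(n):
--         for j in range(n):
--             if s[i][j] == "o":
--                 res += (count_row[i] - 1) * (count_col[j] - 1)
--     return res
-- ===== SOURCE B (Python) =====
-- def solve(n, s):
--     if n <= 0:
--         return 0
--     rows = [row[:n] for row in s[:n]]
--     count_row = [row.count("o") for row in rows]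
--     count_col = [sum(row[j] == "o" for row in rows) for j in range(n)]
--     total = sum(count_row)
--     sum_r2 = sum(r * r for r in count_row)
--     sum_c2 = sum(c * c for c in count_col)
--     cross = sum(r * sum(count_col[j] for j, ch in enumerate(row) if ch == "o")
--                 for r, row in zip(count_row, rows))
--     # sum (R_i-1)(C_j-1) over 'o' cells, expanded by inclusion-exclusion
--     return cross - sum_r2 - sum_c2 + total
-- ===== Notes on version B (the rewrite author's own statement) =====
-- stated objective: alternative
-- what changed: B replaces A's two mutate-in-place index passes by comprehension-built row/column counts and recombines them with the inclusion-exclusion identity sum(R-1)(C-1) = cross - sumR^2 - sumC^2 + total instead of A's per-cell (R-1)(C-1) accumulation.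
import Mathlib
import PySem

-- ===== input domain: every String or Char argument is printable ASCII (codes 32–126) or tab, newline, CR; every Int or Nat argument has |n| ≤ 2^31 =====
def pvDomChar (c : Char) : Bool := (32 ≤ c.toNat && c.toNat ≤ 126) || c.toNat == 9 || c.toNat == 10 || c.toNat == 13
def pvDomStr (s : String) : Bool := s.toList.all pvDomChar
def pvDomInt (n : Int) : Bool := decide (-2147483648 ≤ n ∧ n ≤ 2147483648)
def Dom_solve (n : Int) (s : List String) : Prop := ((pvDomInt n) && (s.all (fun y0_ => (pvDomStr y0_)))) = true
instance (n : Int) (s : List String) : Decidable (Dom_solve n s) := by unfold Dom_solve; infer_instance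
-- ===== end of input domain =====

-- B replaces A's two mutate-in-place passes with comprehension-built counts and the
-- inclusion–exclusion identity Σ(R-1)(C-1) = cross - ΣR² - ΣC² + ΣR (objective: alternative).

-- ===== PORT A =====
-- range(n) is ported as List.range n.toNat (empty when n ≤ 0, exactly as in Python);
-- indices are nonnegative, and s[i][j] is in range under Pre_solve, so getD defaults are never used.
def solve (n : Int) (s : List String) : Int :=
  let m := n.toNat
  let cnt :=
    (List.range m).foldl (fun (st : List Int × List Int) i =>
      (List.range m).foldl (fun (st : List Int × List Int) j =>
        if (s.getD i "").toList.getD j ' ' == 'o' then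
          (st.1.set i (st.1.getD i 0 + 1), st.2.set j (st.2.getD j 0 + 1))
        else st) st)
      (List.replicate m 0, List.replicate m 0)
  (List.range m).foldl (fun res i =>
    (List.range m).foldl (fun res j =>
      if (s.getD i "").toList.getD j ' ' == 'o' then
        res + (cnt.1.getD i 0 - 1) * (cnt.2.getD j 0 - 1)
      else res) res) 0

-- ===== PORT B =====
-- transliteration of Source B; n > 0 past the guard, so row[:n] is List.take n.toNat,
-- and row.count("o") with a one-character needle is List.count 'o'.
def solve_alt (n : Int) (s : List String) : Int :=
  if n ≤ 0 then 0
  else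
    let m := n.toNat
    let rows : List (List Char) := (s.take m).map (fun r => r.toList.take m)
    let countRow : List Int := rows.map (fun row => (row.count 'o' : Int))
    let countCol : List Int :=
      (List.range m).map (fun j => ((rows.countP (fun row => row.getD j ' ' == 'o')) : Int))
    let total := countRow.sum
    let sumR2 := (countRow.map (fun r => r * r)).sum
    let sumC2 := (countCol.map (fun c => c * c)).sum
    let cross := ((countRow.zip rows).map (fun rc =>
        rc.1 * (((PySem.List.enumerate rc.2).filter (fun q => q.2 == 'o')).map
                  (fun q => PySem.List.pyGetD countCol q.1 0)).sum)).sum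
    cross - sumR2 - sumC2 + total

-- ===== PRECONDITION & SPEC =====
-- Pre_solve: exactly the inputs where A's s[i][j] accesses are in range (otherwise A raises IndexError).
def Pre_solve (n : Int) (s : List String) : Prop :=
  0 < n → (n.toNat ≤ s.length ∧ ∀ r ∈ s.take n.toNat, n.toNat ≤ r.toList.length)
instance (n : Int) (s : List String) : Decidable (Pre_solve n s) := by unfold Pre_solve; infer_instance
def pvWitness_solve : Int × List String := (2, ["ox", "oo"])

def Spec_solve (n : Int) (s : List String) (out : Int) : Prop := out = solve_alt n s
instance (n : Int) (s : List String) (out : Int) : Decidable (Spec_solve n s out) := by unfold Spec_solve; infer_instance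

-- ===== CLAIM (what is proved, stated in full; the proofs are below) =====
def Claim_equal_solve : Prop := ∀ (n : Int) (s : List String), Dom_solve n s → Pre_solve n s → Spec_solve n s (solve n s)

-- ===== LEMMAS AND PROOFS =====

-- number of 'o' in row i (among columns < m) and in column j (among rows < m), as seen through P
def pvR (P : Nat → Nat → Bool) (m i : Nat) : Int := ((List.range m).countP (fun j => P i j) : Int)
def pvC (P : Nat → Nat → Bool) (m j : Nat) : Int := ((List.range m).countP (fun i => P i j) : Int)

-- a foldl over a pair whose components are updated independently splits
theorem pv_foldl_pair {α β γ : Type} (l : List γ) (f : α → γ → α) (g : β → γ → β) :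
    ∀ (a : α) (b : β),
      l.foldl (fun st x => (f st.1 x, g st.2 x)) (a, b) = (l.foldl f a, l.foldl g b) := by
  induction l with
  | nil => intro a b; rfl
  | cons x xs ih => intro a b; simpa using ih (f a x) (g b x)

theorem pv_getD_set_self (l : List Int) (i : Nat) (v : Int) (h : i < l.length) :
    (l.set i v).getD i 0 = v := by
  simp [List.getD_eq_getElem?_getD, h]
theorem pv_getD_set_ne (l : List Int) (i k : Nat) (v : Int) (h : i ≠ k) :
    (l.set i v).getD k 0 = l.getD k 0 := by
  simp [List.getD_eq_getElem?_getD, List.getElem?_set_ne h]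

theorem pv_fold_fixed (p : Nat → Bool) (i : Nat) :
    ∀ (js : List Nat) (a : List Int) (k : Nat), i < a.length →
      (js.foldl (fun a j => if p j then a.set i (a.getD i 0 + 1) else a) a).getD k 0
        = a.getD k 0 + (if k = i then (js.countP p : Int) else 0) := by
  intro js
  induction js with
  | nil => intro a k h; simp
  | cons j js ih =>
    intro a k h
    rw [List.foldl_cons]
    by_cases hp : p j
    · rw [if_pos hp]
      rw [ih (a.set i (a.getD i 0 + 1)) k (by simpa using h)]
      by_cases hk : k = i
      · subst hk
        rw [pv_getD_set_self _ _ _ h]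
        simp [hp]
        ring
      · rw [pv_getD_set_ne _ _ _ _ (fun hik => hk hik.symm)]
        simp [hk]
    · rw [if_neg hp, ih a k h]
      simp [hp]

theorem pv_fold_scatter (p : Nat → Bool) :
    ∀ (js : List Nat) (a : List Int) (k : Nat), js.Nodup → (∀ j ∈ js, j < a.length) →
      (js.foldl (fun a j => if p j then a.set j (a.getD j 0 + 1) else a) a).getD k 0
        = a.getD k 0 + (if k ∈ js ∧ p k then 1 else 0) := by
  intro js
  induction js with
  | nil => intro a k _ _; simp
  | cons j js ih =>
    intro a k hnd hlt
    have hj : j < a.length := hlt j (by simp)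
    rw [List.foldl_cons]
    by_cases hp : p j
    · rw [if_pos hp]
      rw [ih (a.set j (a.getD j 0 + 1)) k (by exact (List.nodup_cons.mp hnd).2)
            (fun x hx => by simpa using hlt x (by simp [hx]))]
      by_cases hk : k = j
      · subst hk
        rw [pv_getD_set_self _ _ _ hj]
        have hnotin : k ∉ js := (List.nodup_cons.mp hnd).1
        simp [hnotin, hp]
      · rw [pv_getD_set_ne _ _ _ _ (fun h => hk h.symm)]
        by_cases hm : k ∈ js <;> simp [hm, hk]
    · rw [if_neg hp]
      rw [ih a k (List.nodup_cons.mp hnd).2 (fun x hx => hlt x (by simp [hx]))]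
      by_cases hk : k = j
      · subst hk; simp [hp]
      · simp [hk]


theorem pv_inner_len {α : Type} (g : List Int → α → List Int)
    (hg : ∀ a x, (g a x).length = a.length) :
    ∀ (l : List α) (a : List Int), (l.foldl g a).length = a.length := by
  intro l
  induction l with
  | nil => intro a; rfl
  | cons x xs ih => intro a; rw [List.foldl_cons, ih, hg]

theorem pv_set_if_len (c : Bool) (a : List Int) (i : Nat) (v : Int) :
    (if c then a.set i v else a).length = a.length := by
  by_cases h : c <;> simp [h]

theorem pv_cr_pass (P : Nat → Nat → Bool) (m : Nat) :
    ∀ (is : List Nat) (a : List Int) (k : Nat), a.length = m → is.Nodup → (∀ i ∈ is, i < m) →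
      (is.foldl (fun a i =>
          (List.range m).foldl (fun a j => if P i j then a.set i (a.getD i 0 + 1) else a) a) a).getD k 0
        = a.getD k 0 + (if k ∈ is then pvR P m k else 0) := by
  intro is
  induction is with
  | nil => intro a k _ _ _; simp
  | cons i is ih =>
    intro a k ha hnd hlt
    rw [List.foldl_cons]
    set a' := (List.range m).foldl (fun a j => if P i j then a.set i (a.getD i 0 + 1) else a) a with ha'
    have hlen' : a'.length = m := by
      rw [ha']
      rw [pv_inner_len _ (fun a j => pv_set_if_len _ _ _ _) _ a, ha]
    rw [ih a' k hlen' (List.nodup_cons.mp hnd).2 (fun x hx => hlt x (by simp [hx]))]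
    have hi : i < a.length := by rw [ha]; exact hlt i (by simp)
    rw [ha', pv_fold_fixed (fun j => P i j) i (List.range m) a k hi]
    by_cases hk : k = i
    · subst hk
      have : k ∉ is := (List.nodup_cons.mp hnd).1
      simp [this, pvR]
    · simp [hk]

theorem pv_cc_pass (P : Nat → Nat → Bool) (m : Nat) :
    ∀ (is : List Nat) (a : List Int) (k : Nat), a.length = m → k < m →
      (is.foldl (fun a i =>
          (List.range m).foldl (fun a j => if P i j then a.set j (a.getD j 0 + 1) else a) a) a).getD k 0
        = a.getD k 0 + (is.countP (fun i => P i k) : Int) := by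
  intro is
  induction is with
  | nil => intro a k _ _; simp
  | cons i is ih =>
    intro a k ha hk
    rw [List.foldl_cons]
    set a' := (List.range m).foldl (fun a j => if P i j then a.set j (a.getD j 0 + 1) else a) a with ha'
    have hlen' : a'.length = m := by
      rw [ha', pv_inner_len _ (fun a j => pv_set_if_len _ _ _ _) _ a, ha]
    rw [ih a' k hlen' hk]
    rw [ha', pv_fold_scatter (fun j => P i j) (List.range m) a k (List.nodup_range)
          (fun x hx => by rw [ha]; exact List.mem_range.mp hx)]
    have : (k ∈ List.range m ∧ P i k) ↔ (P i k = true) := by simp [List.mem_range, hk]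
    by_cases hp : P i k
    · simp [hp, List.mem_range, hk]
      ring
    · simp [hp]

theorem pv_foldl_if_add {γ : Type} (l : List γ) (p : γ → Bool) (f : γ → Int) (b : Int) :
    l.foldl (fun r x => if p x then r + f x else r) b
      = b + (l.map (fun x => if p x then f x else 0)).sum := by
  have h : (fun (r : Int) (x : γ) => if p x then r + f x else r)
      = fun r x => r + (if p x then f x else 0) := by
    funext r x; by_cases hp : p x <;> simp [hp]
  rw [h, PySem.List.foldl_add]

theorem pv_countP_cast (m : Nat) (p : Nat → Bool) :
    (((List.range m).countP p : Nat) : Int) = ∑ j ∈ Finset.range m, (if p j then (1:Int) else 0) := by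
  induction m with
  | zero => simp
  | succ m ih =>
    rw [List.range_succ, List.countP_append, Finset.sum_range_succ, ← ih]
    by_cases hp : p m <;> simp [hp]

theorem pv_countP_getD {α : Type} (q : α → Bool) (d : α) :
    ∀ (l : List α), l.countP q = (List.range l.length).countP (fun i => q (l.getD i d)) := by
  intro l
  induction l with
  | nil => simp
  | cons x xs ih =>
    rw [List.countP_cons, List.length_cons, List.range_succ_eq_map, List.countP_cons,
        List.countP_map, ih]
    simp only [List.getD_eq_getElem?_getD]
    have : ((fun i => q ((x :: xs)[i]?.getD d)) ∘ Nat.succ) = fun i => q (xs[i]?.getD d) := by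
      funext i; simp
    rw [this]
    by_cases hq : q x <;> simp [hq, Nat.add_comm]

theorem pv_sum_map_getD {α : Type} (f : α → Int) (d : α) :
    ∀ (l : List α), (l.map f).sum = ∑ i ∈ Finset.range l.length, f (l.getD i d) := by
  intro l
  induction l with
  | nil => simp
  | cons x xs ih =>
    rw [List.map_cons, List.sum_cons, List.length_cons, Finset.sum_range_succ', ih]
    simp [Int.add_comm]

theorem pv_sum_filter_map {γ : Type} (p : γ → Bool) (g : γ → Int) :
    ∀ (l : List γ), ((l.filter p).map g).sum = (l.map (fun x => if p x then g x else 0)).sum := by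
  intro l
  induction l with
  | nil => rfl
  | cons x xs ih =>
    by_cases hp : p x <;> simp [hp, ih]

theorem pv_sum_range_finset (m : Nat) (f : Nat → Int) :
    ((List.range m).map f).sum = ∑ j ∈ Finset.range m, f j := rfl

theorem pv_identity (P : Nat → Nat → Bool) (m : Nat) :
    ∑ i ∈ Finset.range m, ∑ j ∈ Finset.range m,
        (if P i j then (pvR P m i - 1) * (pvC P m j - 1) else 0)
      = (∑ i ∈ Finset.range m, pvR P m i * ∑ j ∈ Finset.range m, (if P i j then pvC P m j else 0))
        - (∑ i ∈ Finset.range m, pvR P m i * pvR P m i)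
        - (∑ j ∈ Finset.range m, pvC P m j * pvC P m j)
        + ∑ i ∈ Finset.range m, pvR P m i := by
  have hexp : ∀ i j, (if P i j then (pvR P m i - 1) * (pvC P m j - 1) else 0)
      = ((if P i j then pvR P m i * pvC P m j else 0) - (if P i j then pvR P m i else 0))
        - (if P i j then pvC P m j else 0) + (if P i j then (1:Int) else 0) := by
    intro i j; by_cases hp : P i j <;> simp [hp]; ring
  have hR : ∀ i, ∑ j ∈ Finset.range m, (if P i j then (1:Int) else 0) = pvR P m i := by
    intro i; rw [pvR, pv_countP_cast]
  have hC : ∀ j, ∑ i ∈ Finset.range m, (if P i j then (1:Int) else 0) = pvC P m j := by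
    intro j; rw [pvC, pv_countP_cast]
  simp only [hexp, Finset.sum_add_distrib, Finset.sum_sub_distrib]
  congr 1
  · congr 1
    · congr 1
      · -- cross term
        refine Finset.sum_congr rfl (fun i _ => ?_)
        rw [Finset.mul_sum]
        refine Finset.sum_congr rfl (fun j _ => ?_)
        by_cases hp : P i j <;> simp [hp]
      · -- ΣR²
        refine Finset.sum_congr rfl (fun i _ => ?_)
        have : ∑ j ∈ Finset.range m, (if P i j then pvR P m i else 0)
            = pvR P m i * ∑ j ∈ Finset.range m, (if P i j then (1:Int) else 0) := by
          rw [Finset.mul_sum]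
          refine Finset.sum_congr rfl (fun j _ => ?_)
          by_cases hp : P i j <;> simp [hp]
        rw [this, hR]
    · -- ΣC²
      rw [Finset.sum_comm]
      refine Finset.sum_congr rfl (fun j _ => ?_)
      have : ∑ i ∈ Finset.range m, (if P i j then pvC P m j else 0)
          = pvC P m j * ∑ i ∈ Finset.range m, (if P i j then (1:Int) else 0) := by
        rw [Finset.mul_sum]
        refine Finset.sum_congr rfl (fun i _ => ?_)
        by_cases hp : P i j <;> simp [hp]
      rw [this, hC]
  · -- total
    refine Finset.sum_congr rfl (fun i _ => ?_)
    exact hR i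

theorem pv_A_val (P : Nat → Nat → Bool) (m : Nat) :
    (List.range m).foldl (fun res i =>
      (List.range m).foldl (fun res j =>
        if P i j then
          res + (((List.range m).foldl (fun (st : List Int × List Int) i =>
                    (List.range m).foldl (fun st j =>
                      if P i j then (st.1.set i (st.1.getD i 0 + 1), st.2.set j (st.2.getD j 0 + 1))
                      else st) st)
                    (List.replicate m 0, List.replicate m 0)).1.getD i 0 - 1)
              * (((List.range m).foldl (fun (st : List Int × List Int) i =>
                    (List.range m).foldl (fun st j =>
                      if P i j then (st.1.set i (st.1.getD i 0 + 1), st.2.set j (st.2.getD j 0 + 1))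
                      else st) st)
                    (List.replicate m 0, List.replicate m 0)).2.getD j 0 - 1)
        else res) res) 0
    = ∑ i ∈ Finset.range m, ∑ j ∈ Finset.range m,
        (if P i j then (pvR P m i - 1) * (pvC P m j - 1) else 0) := by
  set cnt := (List.range m).foldl (fun (st : List Int × List Int) i =>
                (List.range m).foldl (fun st j =>
                  if P i j then (st.1.set i (st.1.getD i 0 + 1), st.2.set j (st.2.getD j 0 + 1))
                  else st) st)
                (List.replicate m 0, List.replicate m 0) with hcnt
  have hpairfun : (fun (st : List Int × List Int) i =>
      (List.range m).foldl (fun st j =>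
        if P i j then (st.1.set i (st.1.getD i 0 + 1), st.2.set j (st.2.getD j 0 + 1))
        else st) st)
    = fun (st : List Int × List Int) i =>
        ((List.range m).foldl (fun a j => if P i j then a.set i (a.getD i 0 + 1) else a) st.1,
         (List.range m).foldl (fun a j => if P i j then a.set j (a.getD j 0 + 1) else a) st.2) := by
    funext st i
    have h2 : (fun (st : List Int × List Int) j =>
        if P i j then (st.1.set i (st.1.getD i 0 + 1), st.2.set j (st.2.getD j 0 + 1)) else st)
      = fun st j =>
          (if P i j then st.1.set i (st.1.getD i 0 + 1) else st.1,
           if P i j then st.2.set j (st.2.getD j 0 + 1) else st.2) := by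
      funext st j
      by_cases hp : P i j <;> simp [hp]
    rw [h2]
    obtain ⟨a, b⟩ := st
    exact pv_foldl_pair (List.range m)
      (fun a j => if P i j then a.set i (a.getD i 0 + 1) else a)
      (fun b j => if P i j then b.set j (b.getD j 0 + 1) else b) a b
  have hpair : cnt =
      ((List.range m).foldl (fun a i =>
          (List.range m).foldl (fun a j => if P i j then a.set i (a.getD i 0 + 1) else a) a)
        (List.replicate m 0),
       (List.range m).foldl (fun a i =>
          (List.range m).foldl (fun a j => if P i j then a.set j (a.getD j 0 + 1) else a) a)
        (List.replicate m 0)) := by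
    rw [hcnt, hpairfun]
    exact pv_foldl_pair (List.range m)
      (fun a i => (List.range m).foldl (fun a j => if P i j then a.set i (a.getD i 0 + 1) else a) a)
      (fun a i => (List.range m).foldl (fun a j => if P i j then a.set j (a.getD j 0 + 1) else a) a)
      (List.replicate m (0:Int)) (List.replicate m (0:Int))
  have hcr : ∀ i, i < m → cnt.1.getD i 0 = pvR P m i := by
    intro i hi
    rw [hpair]
    rw [pv_cr_pass P m (List.range m) _ i (by simp) List.nodup_range (fun x hx => List.mem_range.mp hx)]
    simp [List.mem_range, hi]
  have hcc : ∀ j, j < m → cnt.2.getD j 0 = pvC P m j := by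
    intro j hj
    rw [hpair]
    rw [pv_cc_pass P m (List.range m) _ j (by simp) hj]
    simp [pvC]
  have hstep : (fun (res : Int) i =>
      (List.range m).foldl (fun res j =>
        if P i j then res + (cnt.1.getD i 0 - 1) * (cnt.2.getD j 0 - 1) else res) res)
    = fun res i => res + ((List.range m).map
        (fun j => if P i j then (cnt.1.getD i 0 - 1) * (cnt.2.getD j 0 - 1) else 0)).sum := by
    funext res i
    rw [pv_foldl_if_add]
  rw [hstep, PySem.List.foldl_add]
  rw [pv_sum_range_finset]
  rw [Int.zero_add]
  refine Finset.sum_congr rfl (fun i hi => ?_)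
  rw [pv_sum_range_finset]
  refine Finset.sum_congr rfl (fun j hj => ?_)
  rw [hcr i (Finset.mem_range.mp hi), hcc j (Finset.mem_range.mp hj)]

-- B-side pieces (names only used by the proofs)
def pvPs (s : List String) : Nat → Nat → Bool := fun i j => (s.getD i "").toList.getD j ' ' == 'o'
def pvRows (s : List String) (m : Nat) : List (List Char) := (s.take m).map (fun r => r.toList.take m)
def pvCountRow (s : List String) (m : Nat) : List Int := (pvRows s m).map (fun row => (row.count 'o' : Int))
def pvCountCol (s : List String) (m : Nat) : List Int :=
  (List.range m).map (fun j => (((pvRows s m).countP (fun row => row.getD j ' ' == 'o')) : Int))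

theorem pv_rows_len (s : List String) (m : Nat) (hs : m ≤ s.length) :
    (pvRows s m).length = m := by
  simp [pvRows, List.length_take]; omega

theorem pv_rows_getD (s : List String) (m i : Nat) (hi : i < m) (hs : m ≤ s.length) :
    (pvRows s m).getD i [] = (s.getD i "").toList.take m := by
  have h1 : i < (pvRows s m).length := by rw [pv_rows_len s m hs]; exact hi
  have h2 : i < s.length := lt_of_lt_of_le hi hs
  have h3 : i < (s.take m).length := by simp [List.length_take]; omega
  rw [List.getD_eq_getElem _ _ h1, List.getD_eq_getElem _ _ h2]
  simp [pvRows, List.getElem_take]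

theorem pv_rows_lenI (s : List String) (m i : Nat) (hi : i < m) (hs : m ≤ s.length)
    (hr : ∀ r ∈ s.take m, m ≤ r.toList.length) :
    ((pvRows s m).getD i []).length = m := by
  rw [pv_rows_getD s m i hi hs]
  have h2 : i < s.length := lt_of_lt_of_le hi hs
  have h3 : i < (s.take m).length := by simp [List.length_take]; omega
  have hmem : s.getD i "" ∈ s.take m := by
    rw [List.getD_eq_getElem _ _ h2]
    rw [show s[i] = (s.take m)[i] from (List.getElem_take).symm]
    exact List.getElem_mem h3
  have := hr _ hmem
  simp [List.length_take] at this ⊢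
  omega

theorem pv_rows_getD2 (s : List String) (m i j : Nat) (hi : i < m) (hj : j < m) (hs : m ≤ s.length) :
    ((pvRows s m).getD i []).getD j ' ' = (s.getD i "").toList.getD j ' ' := by
  rw [pv_rows_getD s m i hi hs]
  simp [List.getD_eq_getElem?_getD, hj]

theorem pv_hRi (s : List String) (m i : Nat) (hi : i < m) (hs : m ≤ s.length)
    (hr : ∀ r ∈ s.take m, m ≤ r.toList.length) :
    (((pvRows s m).getD i []).count 'o' : Int) = pvR (pvPs s) m i := by
  rw [List.count_eq_countP, pv_countP_getD _ ' ', pv_rows_lenI s m i hi hs hr, pvR]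
  congr 1
  apply List.countP_congr
  intro j hj
  rw [pv_rows_getD2 s m i j hi (List.mem_range.mp hj) hs]
  simp [pvPs]

theorem pv_hCj (s : List String) (m j : Nat) (hj : j < m) (hs : m ≤ s.length) :
    (((pvRows s m).countP (fun row => row.getD j ' ' == 'o')) : Int) = pvC (pvPs s) m j := by
  rw [pv_countP_getD _ [], pv_rows_len s m hs, pvC]
  congr 1
  apply List.countP_congr
  intro i hi
  rw [pv_rows_getD2 s m i j (List.mem_range.mp hi) hj hs]
  simp [pvPs]

theorem pv_B_val (s : List String) (m : Nat) (hs : m ≤ s.length)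
    (hr : ∀ r ∈ s.take m, m ≤ r.toList.length) :
    (((pvCountRow s m).zip (pvRows s m)).map (fun rc =>
        rc.1 * (((PySem.List.enumerate rc.2).filter (fun q => q.2 == 'o')).map
                  (fun q => PySem.List.pyGetD (pvCountCol s m) q.1 0)).sum)).sum
      - ((pvCountRow s m).map (fun r => r * r)).sum
      - ((pvCountCol s m).map (fun c => c * c)).sum
      + (pvCountRow s m).sum
    = (∑ i ∈ Finset.range m, pvR (pvPs s) m i * ∑ j ∈ Finset.range m,
          (if pvPs s i j then pvC (pvPs s) m j else 0))
      - (∑ i ∈ Finset.range m, pvR (pvPs s) m i * pvR (pvPs s) m i)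
      - (∑ j ∈ Finset.range m, pvC (pvPs s) m j * pvC (pvPs s) m j)
      + ∑ i ∈ Finset.range m, pvR (pvPs s) m i := by
  -- inner per-row sum
  have hinner : ∀ i, i < m →
      (((PySem.List.enumerate ((pvRows s m).getD i [])).filter (fun q => q.2 == 'o')).map
          (fun q => PySem.List.pyGetD (pvCountCol s m) q.1 0)).sum
        = ∑ j ∈ Finset.range m, (if pvPs s i j then pvC (pvPs s) m j else 0) := by
    intro i hi
    rw [pv_sum_filter_map]
    rw [PySem.List.enumerate_eq_map_pyRange ((pvRows s m).getD i []) ' ']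
    rw [PySem.List.len_eq, pv_rows_lenI s m i hi hs hr]
    rw [PySem.List.pyRange_zero_natCast, List.map_map, List.map_map]
    rw [pv_sum_range_finset]
    refine Finset.sum_congr rfl (fun j hj => ?_)
    have hj' := Finset.mem_range.mp hj
    simp only [Function.comp, PySem.List.pyGetD_natCast]
    rw [pv_rows_getD2 s m i j hi hj' hs]
    rw [show (pvCountCol s m).getD j 0
          = (((pvRows s m).countP (fun row => row.getD j ' ' == 'o')) : Int) from
        PySem.List.getD_map_range _ m j 0 hj']
    rw [pv_hCj s m j hj' hs]
    rfl
  -- zip collapses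
  have hzip : (pvCountRow s m).zip (pvRows s m)
      = (pvRows s m).map (fun r => ((r.count 'o' : Int), r)) := by
    unfold pvCountRow
    nth_rewrite 2 [← List.map_id (pvRows s m)]
    exact List.zip_map'
  have hcross : (((pvCountRow s m).zip (pvRows s m)).map (fun rc =>
        rc.1 * (((PySem.List.enumerate rc.2).filter (fun q => q.2 == 'o')).map
                  (fun q => PySem.List.pyGetD (pvCountCol s m) q.1 0)).sum)).sum
      = ∑ i ∈ Finset.range m, pvR (pvPs s) m i * ∑ j ∈ Finset.range m,
          (if pvPs s i j then pvC (pvPs s) m j else 0) := by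
    rw [hzip, List.map_map]
    rw [pv_sum_map_getD _ [], pv_rows_len s m hs]
    refine Finset.sum_congr rfl (fun i hi => ?_)
    have hi' := Finset.mem_range.mp hi
    simp only [Function.comp]
    rw [pv_hRi s m i hi' hs hr, hinner i hi']
  have htotal : (pvCountRow s m).sum = ∑ i ∈ Finset.range m, pvR (pvPs s) m i := by
    unfold pvCountRow
    rw [pv_sum_map_getD _ [], pv_rows_len s m hs]
    exact Finset.sum_congr rfl (fun i hi => pv_hRi s m i (Finset.mem_range.mp hi) hs hr)
  have hsumR2 : ((pvCountRow s m).map (fun r => r * r)).sum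
      = ∑ i ∈ Finset.range m, pvR (pvPs s) m i * pvR (pvPs s) m i := by
    unfold pvCountRow
    rw [List.map_map, pv_sum_map_getD _ [], pv_rows_len s m hs]
    refine Finset.sum_congr rfl (fun i hi => ?_)
    simp only [Function.comp]
    rw [pv_hRi s m i (Finset.mem_range.mp hi) hs hr]
  have hsumC2 : ((pvCountCol s m).map (fun c => c * c)).sum
      = ∑ j ∈ Finset.range m, pvC (pvPs s) m j * pvC (pvPs s) m j := by
    unfold pvCountCol
    rw [List.map_map, pv_sum_range_finset]
    refine Finset.sum_congr rfl (fun j hj => ?_)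
    simp only [Function.comp]
    rw [pv_hCj s m j (Finset.mem_range.mp hj) hs]
  rw [hcross, htotal, hsumR2, hsumC2]


-- ===== VERDICT (by name: the statement is the Claim_ definition above) =====
theorem solve_spec : Claim_equal_solve := by
  intro n s _ hpre
  unfold Spec_solve
  by_cases hn : n ≤ 0
  · have h0 : n.toNat = 0 := Int.toNat_of_nonpos hn
    simp [solve, solve_alt, h0, hn]
  · obtain ⟨hs, hr⟩ := hpre (by omega)
    unfold solve_alt
    rw [if_neg hn]
    exact (pv_A_val (pvPs s) n.toNat).trans
      ((pv_identity (pvPs s) n.toNat).trans (pv_B_val s n.toNat hs hr).symm)
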